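-- pv_equiv track=rewrite | github.com/mvillalva/python.unsam | ejercicios/Clase04/Correccion-2.py | propagar
-- ===== SOURCE A (Python) =====
-- def propagar(lista):
--     propagada=[]    #lista propagada
--     encendido=0     #variable que indica si el último fósforo está encendido
--     apagados=[]     #Lista de los últimos fósforos apagados al recorrer la lista
--     for e in lista:      #recorro la lista
--         if e==0:                            #Si el fósforo esta apagado y...
--             if encendido:                   # ...el anterior encendido...
--                 propagada.append(1)         #...agrego fósforo encendido.
--             else:
--                 apagados.append(0) #si el fósforo apagado y el anterior no está encendido agregos este fósforo a la lista apagados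
--         elif e==1:                            #Si el fósforo está encendido...
--             propagada+=[1 for el in apagados]    #...enciendo la lista "apagados" y la agrego a la lista "propagada"
--             apagados=[]                          #vacío la lista de apagados
--             encendido=1     #indico que el fósforo está encendido.
--             propagada.append(1)              #Agrego el fósforo encendido.
--         elif e==-1:                          #Si el fósforo está quemado...
--             propagada+=apagados                #...agrego la lista "apagados" a la lista "propagada"
--             apagados=[]                        #vacío la lista de apagados
--             propagada.append(-1)         #Agrego el fósforo quemado.
--             encendido=0    # indico que el fósforo no está encendido
--     propagada+=apagados  #si quedaron fósforos apagados los agrego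
--     return propagada
-- ===== SOURCE B (Python) =====
-- def propagar(lista):
--     out = []
--     n = 0        # recognized (0/1) matches buffered in the current -1-delimited segment
--     lit = False  # segment contains a 1
--     for e in lista:
--         if e == -1:
--             out += [1] * n if lit else [0] * n
--             out.append(-1)
--             n = 0
--             lit = False
--         elif e == 0 or e == 1:
--             n += 1
--             lit = lit or e == 1
--     out += [1] * n if lit else [0] * n
--     return out
-- ===== Notes on version B (the rewrite author's own statement) =====
-- stated objective: simpler
-- what changed: Replaces the lit-flag streaming with its eager emission and pending 'apagados' list by a segment accumulator: count the recognized 0/1 matches of each -1-delimited segment and flush them all at once as ones (if the segment held a 1) or zeros, so the buffered-zeros list and the retroactive relighting disappear.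
import Mathlib
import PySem

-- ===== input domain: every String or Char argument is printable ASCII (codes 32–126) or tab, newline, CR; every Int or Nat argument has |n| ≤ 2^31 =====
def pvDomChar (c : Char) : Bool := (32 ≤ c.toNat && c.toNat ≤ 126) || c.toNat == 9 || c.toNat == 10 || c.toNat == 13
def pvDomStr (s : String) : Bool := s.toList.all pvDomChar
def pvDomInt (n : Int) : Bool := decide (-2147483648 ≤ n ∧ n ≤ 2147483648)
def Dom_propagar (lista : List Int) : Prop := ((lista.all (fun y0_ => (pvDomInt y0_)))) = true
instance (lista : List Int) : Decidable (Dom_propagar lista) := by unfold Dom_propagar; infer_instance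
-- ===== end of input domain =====

-- ===== PORT A =====
-- A: streams with an 'encendido' flag and a pending list of unlit matches.
def stepA (st : List Int × Int × List Int) (e : Int) : List Int × Int × List Int :=
  let prop := st.1; let enc := st.2.1; let apag := st.2.2
  if e = 0 then
    if enc ≠ 0 then (prop ++ [1], enc, apag) else (prop, enc, apag ++ [0])
  else if e = 1 then (prop ++ apag.map (fun _ => (1 : Int)) ++ [1], 1, [])
  else if e = -1 then (prop ++ apag ++ [-1], 0, [])
  else st

def propagar (lista : List Int) : List Int :=
  let s := lista.foldl stepA ([], 0, [])
  s.1 ++ s.2.2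

-- ===== PORT B =====
-- B: accumulate each -1-delimited segment (count + had-a-1 flag), flush it at once.
def flushB (n : Nat) (lit : Bool) : List Int :=
  if lit then List.replicate n 1 else List.replicate n 0

def stepB (st : List Int × Nat × Bool) (e : Int) : List Int × Nat × Bool :=
  let out := st.1; let n := st.2.1; let lit := st.2.2
  if e = -1 then (out ++ flushB n lit ++ [-1], 0, false)
  else if e = 0 ∨ e = 1 then (out, n + 1, lit || e = 1)
  else st

def propagar_alt (lista : List Int) : List Int :=
  let s := lista.foldl stepB ([], 0, false)
  s.1 ++ flushB s.2.1 s.2.2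

-- ===== PRECONDITION & SPEC =====
def Spec_propagar (lista : List Int) (out : List Int) : Prop := out = propagar_alt lista
instance (lista : List Int) (out : List Int) : Decidable (Spec_propagar lista out) := by unfold Spec_propagar; infer_instance

-- ===== CLAIM (what is proved, stated in full; the proofs are below) =====
def Claim_equal_propagar : Prop := ∀ (lista : List Int), Dom_propagar lista → Spec_propagar lista (propagar lista)

-- ===== LEMMAS AND PROOFS =====

-- Invariant linking A's streaming state to B's segment accumulator:
-- when B holds (out, n, lit), A holds (out ++ [lit ones emitted eagerly], lit-flag, pending zeros).
theorem stepAB_inv : ∀ (l out : List Int) (n : Nat) (lit : Bool),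
    ((l.foldl stepA (out ++ (if lit then List.replicate n (1:Int) else []),
        (if lit then (1:Int) else 0),
        (if lit then ([] : List Int) else List.replicate n (0:Int)))).1
      ++ (l.foldl stepA (out ++ (if lit then List.replicate n (1:Int) else []),
        (if lit then (1:Int) else 0),
        (if lit then ([] : List Int) else List.replicate n (0:Int)))).2.2)
    = ((l.foldl stepB (out, n, lit)).1
        ++ flushB (l.foldl stepB (out, n, lit)).2.1 (l.foldl stepB (out, n, lit)).2.2) := by
  intro l
  induction l with
  | nil =>
    intro out n lit
    cases lit <;> simp [flushB]
  | cons e l ih =>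
    intro out n lit
    by_cases h0 : e = 0
    · subst h0
      cases lit with
      | false =>
        have := ih out (n + 1) false
        simpa [stepA, stepB, List.replicate_succ' (n := n), List.append_assoc] using this
      | true =>
        have := ih out (n + 1) true
        simpa [stepA, stepB, List.replicate_succ' (n := n), List.append_assoc] using this
    · by_cases h1 : e = 1
      · subst h1
        cases lit with
        | false =>
          have := ih out (n + 1) true
          simpa [stepA, stepB, List.map_replicate, List.replicate_succ' (n := n),
            List.append_assoc] using this
        | true =>
          have := ih out (n + 1) true
          simpa [stepA, stepB, List.replicate_succ' (n := n), List.append_assoc] using this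
      · by_cases hm : e = -1
        · subst hm
          cases lit with
          | false =>
            have := ih (out ++ List.replicate n (0:Int) ++ [-1]) 0 false
            simpa [stepA, stepB, flushB, List.append_assoc] using this
          | true =>
            have := ih (out ++ List.replicate n (1:Int) ++ [-1]) 0 false
            simpa [stepA, stepB, flushB, List.append_assoc] using this
        · cases lit with
          | false =>
            have := ih out n false
            simpa [stepA, stepB, h0, h1, hm] using this
          | true =>
            have := ih out n true
            simpa [stepA, stepB, h0, h1, hm] using this

-- ===== VERDICT (by name: the statement is the Claim_ definition above) =====
theorem propagar_spec : Claim_equal_propagar := by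
  intro lista _
  unfold Spec_propagar propagar propagar_alt
  have := stepAB_inv lista [] 0 false
  simpa using this
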